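-- pv_equiv track=rewrite | github.com/g-s01/data-programming-btp | gautam-results-and-analysis/raw-to-fine-direct/through-lfs/context-window-one/lfs_for_raw_sentence_gpt.py | label_sentence_Medical_Disease
-- ===== SOURCE A (Python) =====
-- ABSTAIN = -1
--
-- MEDICAL_DISEASE = 7
--
-- def label_sentence_Medical_Disease(tokens):
--     """
--     Labels each token in a sentence as Medical_Disease if it indicates a medical disease or condition.
--     Returns ABSTAIN for tokens that do not match the category.
--
--     Args:
--     tokens: list of str - A list of words representing a sentence.
--
--     Returns:
--     list of str - A list of labels for each token.
--     """
--     # Common disease-related terms and context keywords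
--     disease_indicators = {
--         'disease', 'syndrome', 'disorder', 'condition', 'illness', 'fever', 'cancer', 'infection',
--         'defect', 'paralysis', 'delusion', 'malady', 'ailment', 'affliction'
--     }
--     medical_context = {
--         'diagnosed', 'treated', 'symptoms', 'remedy', 'therapy', 'treatment', 'medication',
--         'caused', 'risk', 'factors', 'condition', 'autoimmune', 'genetic', 'psychiatric',
--         'mental', 'chronic', 'acute', 'infection', 'virus', 'disease', 'outbreak', 'epidemic',
--         'pandemic', 'epileptic', 'drug', 'medications', 'response', 'clinical'
--     }
--
--     labels = []
--
--     for i, token in enumerate(tokens):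
--         token_lower = token.lower()
--
--         # Check if the token or surrounding tokens suggest a disease
--         if (
--             token_lower in disease_indicators and (  # The token itself indicates a disease
--             (i > 0 and tokens[i - 1].lower() in disease_indicators) or  # Preceded by a disease indicator
--             (i < len(tokens) - 1 and tokens[i + 1].lower() in disease_indicators) or  # Followed by a disease indicator
--             (i > 0 and tokens[i - 1].lower() in medical_context) or  # Preceded by a medical context keyword
--             (i < len(tokens) - 1 and tokens[i + 1].lower() in medical_context))  # Followed by a medical context keyword
--         ):
--             labels.append(MEDICAL_DISEASE)
--         else:
--             labels.append(ABSTAIN)  # Default to 'O' if no match is found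
--
--     return labels
-- ===== SOURCE B (Python) =====
-- ABSTAIN = -1
--
-- MEDICAL_DISEASE = 7
--
-- def label_sentence_Medical_Disease(tokens):
--     disease_indicators = {
--         'disease', 'syndrome', 'disorder', 'condition', 'illness', 'fever', 'cancer', 'infection',
--         'defect', 'paralysis', 'delusion', 'malady', 'ailment', 'affliction'
--     }
--     medical_context = {
--         'diagnosed', 'treated', 'symptoms', 'remedy', 'therapy', 'treatment', 'medication',
--         'caused', 'risk', 'factors', 'condition', 'autoimmune', 'genetic', 'psychiatric',
--         'mental', 'chronic', 'acute', 'infection', 'virus', 'disease', 'outbreak', 'epidemic',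
--         'pandemic', 'epileptic', 'drug', 'medications', 'response', 'clinical'
--     }
--     combined = disease_indicators | medical_context
--     lows = [t.lower() for t in tokens]
--     # Edge scan: walk the n-1 ADJACENT PAIRS once; each edge marks its endpoint(s)
--     # that are disease indicators whose partner carries any keyword.
--     marked = set()
--     for i in range(len(lows) - 1):
--         a, b = lows[i], lows[i + 1]
--         if a in disease_indicators and b in combined:
--             marked.add(i)
--         if b in disease_indicators and a in combined:
--             marked.add(i + 1)
--     return [MEDICAL_DISEASE if i in marked else ABSTAIN for i in range(len(lows))]
-- ===== Notes on version B (the rewrite author's own statement) =====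
-- stated objective: alternative
-- what changed: Replaces A's per-token windowed scan (four neighbour membership tests, re-lowercasing each neighbour at every position) with an edge scan: one pass over the n-1 adjacent pairs that marks into a set the endpoint indices that are indicators whose partner carries any keyword, then a render pass mapping marked/unmarked indices to labels.
import Mathlib
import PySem

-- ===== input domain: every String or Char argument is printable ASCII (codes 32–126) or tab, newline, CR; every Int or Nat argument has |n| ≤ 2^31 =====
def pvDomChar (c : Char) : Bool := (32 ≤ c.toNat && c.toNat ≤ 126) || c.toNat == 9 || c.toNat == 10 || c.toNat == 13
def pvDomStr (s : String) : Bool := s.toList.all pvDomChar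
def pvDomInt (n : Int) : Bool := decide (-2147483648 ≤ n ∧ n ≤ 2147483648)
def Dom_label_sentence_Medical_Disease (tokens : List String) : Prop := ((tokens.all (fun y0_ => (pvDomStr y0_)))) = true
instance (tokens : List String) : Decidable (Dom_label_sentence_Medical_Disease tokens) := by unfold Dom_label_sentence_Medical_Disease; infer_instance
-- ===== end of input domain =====

-- B replaces A's per-token windowed scan by an edge scan over adjacent pairs that marks
-- labeled indices into a set, followed by a render pass (alternative decomposition).

-- ===== PORT A =====
def pvInd : PySem.Set String := PySem.Set.ofList
  ["disease", "syndrome", "disorder", "condition", "illness", "fever", "cancer", "infection",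
   "defect", "paralysis", "delusion", "malady", "ailment", "affliction"]

def pvCtx : PySem.Set String := PySem.Set.ofList
  ["diagnosed", "treated", "symptoms", "remedy", "therapy", "treatment", "medication",
   "caused", "risk", "factors", "condition", "autoimmune", "genetic", "psychiatric",
   "mental", "chronic", "acute", "infection", "virus", "disease", "outbreak", "epidemic",
   "pandemic", "epileptic", "drug", "medications", "response", "clinical"]

def label_sentence_Medical_Disease (tokens : List String) : List Int :=
  (PySem.List.enumerate tokens).foldl (fun labels p =>
    let i := p.1
    let token_lower := PySem.Str.lower p.2
    if token_lower ∈ pvInd ∧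
       ((i > 0 ∧ PySem.Str.lower (PySem.List.pyGetD tokens (i - 1) "") ∈ pvInd) ∨
        (i < (tokens.length : Int) - 1 ∧ PySem.Str.lower (PySem.List.pyGetD tokens (i + 1) "") ∈ pvInd) ∨
        (i > 0 ∧ PySem.Str.lower (PySem.List.pyGetD tokens (i - 1) "") ∈ pvCtx) ∨
        (i < (tokens.length : Int) - 1 ∧ PySem.Str.lower (PySem.List.pyGetD tokens (i + 1) "") ∈ pvCtx))
    then labels ++ [7]
    else labels ++ [-1]) []

-- ===== PORT B =====
def pvComb : PySem.Set String := PySem.Set.union pvInd pvCtx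

-- loop body of Source B's edge scan (an edge marks its indicator endpoints whose partner is a keyword)
def pvStep (lows : List String) (m : PySem.Set Nat) (i : Nat) : PySem.Set Nat :=
  let a := lows.getD i ""
  let b := lows.getD (i + 1) ""
  let m1 := if a ∈ pvInd ∧ b ∈ pvComb then PySem.Set.add m i else m
  if b ∈ pvInd ∧ a ∈ pvComb then PySem.Set.add m1 (i + 1) else m1

def label_sentence_Medical_Disease_alt (tokens : List String) : List Int :=
  let lows := tokens.map PySem.Str.lower
  let marked := (List.range (lows.length - 1)).foldl (pvStep lows) PySem.Set.empty
  (List.range lows.length).map (fun i => if i ∈ marked then (7 : Int) else -1)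

-- ===== PRECONDITION & SPEC =====
def Spec_label_sentence_Medical_Disease (tokens : List String) (out : List Int) : Prop := out = label_sentence_Medical_Disease_alt tokens
instance (tokens : List String) (out : List Int) : Decidable (Spec_label_sentence_Medical_Disease tokens out) := by unfold Spec_label_sentence_Medical_Disease; infer_instance

-- ===== CLAIM (what is proved, stated in full; the proofs are below) =====
def Claim_equal_label_sentence_Medical_Disease : Prop := ∀ (tokens : List String), Dom_label_sentence_Medical_Disease tokens → Spec_label_sentence_Medical_Disease tokens (label_sentence_Medical_Disease tokens)

-- ===== LEMMAS AND PROOFS =====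

theorem mem_pvComb (s : String) : s ∈ pvComb ↔ s ∈ pvInd ∨ s ∈ pvCtx := by
  simp [pvComb, PySem.Set.mem_union]

theorem mem_pvStep (lows : List String) (m : PySem.Set Nat) (k x : Nat) :
    x ∈ pvStep lows m k ↔ x ∈ m ∨
      (x = k ∧ lows.getD k "" ∈ pvInd ∧ lows.getD (k + 1) "" ∈ pvComb) ∨
      (x = k + 1 ∧ lows.getD (k + 1) "" ∈ pvInd ∧ lows.getD k "" ∈ pvComb) := by
  simp only [pvStep]
  split_ifs with h1 h2 h2 <;> simp [PySem.Set.mem_add] <;> tauto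

theorem mem_foldl_pvStep (lows : List String) (k : Nat) (m0 : PySem.Set Nat) (x : Nat) :
    (x ∈ (List.range k).foldl (pvStep lows) m0) ↔ x ∈ m0 ∨
      (x < k ∧ lows.getD x "" ∈ pvInd ∧ lows.getD (x + 1) "" ∈ pvComb) ∨
      (1 ≤ x ∧ x ≤ k ∧ lows.getD x "" ∈ pvInd ∧ lows.getD (x - 1) "" ∈ pvComb) := by
  induction k generalizing m0 with
  | zero =>
    simp only [List.range_zero, List.foldl_nil]
    constructor
    · exact Or.inl
    · rintro (h | ⟨h, _⟩ | ⟨h1, h2, _⟩)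
      · exact h
      · omega
      · omega
  | succ k ih =>
    rw [List.range_succ, List.foldl_append]
    simp only [List.foldl_cons, List.foldl_nil]
    rw [mem_pvStep, ih]
    constructor
    · rintro ((h | ⟨h1, h2⟩ | ⟨h1, h2, h3⟩) | ⟨rfl, h2⟩ | ⟨rfl, h2⟩)
      · exact Or.inl h
      · exact Or.inr (Or.inl ⟨by omega, h2⟩)
      · exact Or.inr (Or.inr ⟨h1, by omega, h3⟩)
      · exact Or.inr (Or.inl ⟨by omega, h2⟩)
      · refine Or.inr (Or.inr ⟨by omega, by omega, ?_⟩)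
        simpa using h2
    · rintro (h | ⟨h1, h2⟩ | ⟨h1, h2, h3⟩)
      · exact Or.inl (Or.inl h)
      · by_cases hx : x < k
        · exact Or.inl (Or.inr (Or.inl ⟨hx, h2⟩))
        · have : x = k := by omega
          subst this
          exact Or.inr (Or.inl ⟨rfl, h2⟩)
      · by_cases hx : x ≤ k
        · exact Or.inl (Or.inr (Or.inr ⟨h1, hx, h3⟩))
        · have : x = k + 1 := by omega
          subst this
          refine Or.inr (Or.inr ⟨rfl, ?_⟩)
          simpa using h3

theorem label_A_eq_map (tokens : List String) :
    label_sentence_Medical_Disease tokens =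
      (PySem.List.enumerate tokens).map (fun p =>
        if PySem.Str.lower p.2 ∈ pvInd ∧
           ((p.1 > 0 ∧ PySem.Str.lower (PySem.List.pyGetD tokens (p.1 - 1) "") ∈ pvInd) ∨
            (p.1 < (tokens.length : Int) - 1 ∧ PySem.Str.lower (PySem.List.pyGetD tokens (p.1 + 1) "") ∈ pvInd) ∨
            (p.1 > 0 ∧ PySem.Str.lower (PySem.List.pyGetD tokens (p.1 - 1) "") ∈ pvCtx) ∨
            (p.1 < (tokens.length : Int) - 1 ∧ PySem.Str.lower (PySem.List.pyGetD tokens (p.1 + 1) "") ∈ pvCtx))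
        then (7 : Int) else -1) := by
  unfold label_sentence_Medical_Disease
  have h : (fun (labels : List Int) (p : Int × String) =>
      let i := p.1
      let token_lower := PySem.Str.lower p.2
      if token_lower ∈ pvInd ∧
         ((i > 0 ∧ PySem.Str.lower (PySem.List.pyGetD tokens (i - 1) "") ∈ pvInd) ∨
          (i < (tokens.length : Int) - 1 ∧ PySem.Str.lower (PySem.List.pyGetD tokens (i + 1) "") ∈ pvInd) ∨
          (i > 0 ∧ PySem.Str.lower (PySem.List.pyGetD tokens (i - 1) "") ∈ pvCtx) ∨
          (i < (tokens.length : Int) - 1 ∧ PySem.Str.lower (PySem.List.pyGetD tokens (i + 1) "") ∈ pvCtx))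
      then labels ++ [7] else labels ++ [-1]) =
      (fun labels p => labels ++
        [if PySem.Str.lower p.2 ∈ pvInd ∧
           ((p.1 > 0 ∧ PySem.Str.lower (PySem.List.pyGetD tokens (p.1 - 1) "") ∈ pvInd) ∨
            (p.1 < (tokens.length : Int) - 1 ∧ PySem.Str.lower (PySem.List.pyGetD tokens (p.1 + 1) "") ∈ pvInd) ∨
            (p.1 > 0 ∧ PySem.Str.lower (PySem.List.pyGetD tokens (p.1 - 1) "") ∈ pvCtx) ∨
            (p.1 < (tokens.length : Int) - 1 ∧ PySem.Str.lower (PySem.List.pyGetD tokens (p.1 + 1) "") ∈ pvCtx))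
         then (7 : Int) else -1]) := by
    funext labels p
    simp only []
    split <;> rfl
  rw [h, PySem.List.foldl_append_singleton_eq_map]
  simp

theorem getD_lows (tokens : List String) (j : Nat) (hj : j < tokens.length) :
    (tokens.map PySem.Str.lower).getD j "" = PySem.Str.lower tokens[j] := by
  rw [List.getD_eq_getElem _ _ (by simpa using hj), List.getElem_map]

set_option maxHeartbeats 1000000 in
theorem label_pointwise (tokens : List String) (i : Nat) (hi : i < tokens.length) :
    (if PySem.Str.lower tokens[i] ∈ pvInd ∧
        (((i : Int) > 0 ∧ PySem.Str.lower (PySem.List.pyGetD tokens ((i : Int) - 1) "") ∈ pvInd) ∨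
         ((i : Int) < (tokens.length : Int) - 1 ∧ PySem.Str.lower (PySem.List.pyGetD tokens ((i : Int) + 1) "") ∈ pvInd) ∨
         ((i : Int) > 0 ∧ PySem.Str.lower (PySem.List.pyGetD tokens ((i : Int) - 1) "") ∈ pvCtx) ∨
         ((i : Int) < (tokens.length : Int) - 1 ∧ PySem.Str.lower (PySem.List.pyGetD tokens ((i : Int) + 1) "") ∈ pvCtx))
     then (7 : Int) else -1) =
    (if i ∈ (List.range ((tokens.map PySem.Str.lower).length - 1)).foldl
              (pvStep (tokens.map PySem.Str.lower)) PySem.Set.empty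
     then (7 : Int) else -1) := by
  set lows := tokens.map PySem.Str.lower with hlows
  have hlen : lows.length = tokens.length := by simp [hlows]
  refine if_congr ?_ rfl rfl
  rw [mem_foldl_pvStep]
  have hself : lows.getD i "" = PySem.Str.lower tokens[i] := getD_lows tokens i hi
  constructor
  · rintro ⟨hc, hnb⟩
    rcases hnb with ⟨hpos, hmem⟩ | ⟨hlt, hmem⟩ | ⟨hpos, hmem⟩ | ⟨hlt, hmem⟩
    · right; right
      refine ⟨by omega, by omega, by rwa [hself], ?_⟩
      have hlt' : i - 1 < tokens.length := by omega
      have hcast : (i : Int) - 1 = ((i - 1 : Nat) : Int) := by omega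
      rw [hcast, PySem.List.pyGetD_natCast, List.getD_eq_getElem _ _ hlt'] at hmem
      rw [getD_lows tokens (i - 1) hlt', mem_pvComb]
      exact Or.inl hmem
    · right; left
      refine ⟨by omega, by rwa [hself], ?_⟩
      have hlt' : i + 1 < tokens.length := by omega
      have hcast : (i : Int) + 1 = ((i + 1 : Nat) : Int) := by omega
      rw [hcast, PySem.List.pyGetD_natCast, List.getD_eq_getElem _ _ hlt'] at hmem
      rw [getD_lows tokens (i + 1) hlt', mem_pvComb]
      exact Or.inl hmem
    · right; right
      refine ⟨by omega, by omega, by rwa [hself], ?_⟩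
      have hlt' : i - 1 < tokens.length := by omega
      have hcast : (i : Int) - 1 = ((i - 1 : Nat) : Int) := by omega
      rw [hcast, PySem.List.pyGetD_natCast, List.getD_eq_getElem _ _ hlt'] at hmem
      rw [getD_lows tokens (i - 1) hlt', mem_pvComb]
      exact Or.inr hmem
    · right; left
      refine ⟨by omega, by rwa [hself], ?_⟩
      have hlt' : i + 1 < tokens.length := by omega
      have hcast : (i : Int) + 1 = ((i + 1 : Nat) : Int) := by omega
      rw [hcast, PySem.List.pyGetD_natCast, List.getD_eq_getElem _ _ hlt'] at hmem
      rw [getD_lows tokens (i + 1) hlt', mem_pvComb]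
      exact Or.inr hmem
  · rintro (h | ⟨h1, h2, h3⟩ | ⟨h1, h2, h3, h4⟩)
    · exact absurd h (by simp [PySem.Set.empty])
    · have hlt' : i + 1 < tokens.length := by omega
      rw [hself] at h2
      rw [getD_lows tokens (i + 1) hlt', mem_pvComb] at h3
      have hcast : (i : Int) + 1 = ((i + 1 : Nat) : Int) := by omega
      refine ⟨h2, ?_⟩
      rcases h3 with h | h
      · exact Or.inr (Or.inl ⟨by omega, by
          rw [hcast, PySem.List.pyGetD_natCast, List.getD_eq_getElem _ _ hlt']; exact h⟩)
      · exact Or.inr (Or.inr (Or.inr ⟨by omega, by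
          rw [hcast, PySem.List.pyGetD_natCast, List.getD_eq_getElem _ _ hlt']; exact h⟩))
    · have hlt' : i - 1 < tokens.length := by omega
      rw [hself] at h3
      rw [getD_lows tokens (i - 1) hlt', mem_pvComb] at h4
      have hcast : (i : Int) - 1 = ((i - 1 : Nat) : Int) := by omega
      refine ⟨h3, ?_⟩
      rcases h4 with h | h
      · exact Or.inl ⟨by omega, by
          rw [hcast, PySem.List.pyGetD_natCast, List.getD_eq_getElem _ _ hlt']; exact h⟩
      · exact Or.inr (Or.inr (Or.inl ⟨by omega, by
          rw [hcast, PySem.List.pyGetD_natCast, List.getD_eq_getElem _ _ hlt']; exact h⟩))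

-- ===== VERDICT (by name: the statement is the Claim_ definition above) =====
theorem label_sentence_Medical_Disease_spec : Claim_equal_label_sentence_Medical_Disease := by
  intro tokens _
  unfold Spec_label_sentence_Medical_Disease label_sentence_Medical_Disease_alt
  rw [label_A_eq_map]
  apply List.ext_getElem
  · simp [PySem.List.length_enumerate]
  · intro i h1 h2
    simp only [List.getElem_map, PySem.List.getElem_enumerate, List.getElem_range]
    have hi : i < tokens.length := by simpa [PySem.List.length_enumerate] using h1
    simpa using label_pointwise tokens i hi
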